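-- pv_equiv track=rewrite | github.com/JoshuaShinkle/COS-120 | LABS/LAB10/Lab_10_12.py | sumTheListPositions
-- ===== SOURCE A (Python) =====
-- def sumTheListPositions(ListOfLists1,ListOfLists2):
--     newList = []
--     for indexOfLst in range(len(ListOfLists1)):
--         newList.append([])
--         if len(ListOfLists1[indexOfLst]) > len(ListOfLists2[indexOfLst]):
--             for index in range(len(ListOfLists1[indexOfLst])):
--                 if index < len(ListOfLists2[indexOfLst]):
--                     newList[indexOfLst].append(ListOfLists1[indexOfLst][index] + ListOfLists2[indexOfLst][index])
--                 else:
--                     newList[indexOfLst].append(ListOfLists1[indexOfLst][index])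
--         else:
--             for index in range(len(ListOfLists2[indexOfLst])):
--                 if index < len(ListOfLists1[indexOfLst]):
--                     newList[indexOfLst].append(ListOfLists1[indexOfLst][index] + ListOfLists2[indexOfLst][index])
--                 else:
--                     newList[indexOfLst].append(ListOfLists2[indexOfLst][index])
--     return newList
-- ===== SOURCE B (Python) =====
-- def sumTheListPositions(ListOfLists1, ListOfLists2):
--     def addRows(a, b):
--         if not a:
--             return list(b)
--         if not b:
--             return list(a)
--         return [a[0] + b[0]] + addRows(a[1:], b[1:])
--     if not ListOfLists1:
--         return []
--     return [addRows(ListOfLists1[0], ListOfLists2[0])] + \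
--         sumTheListPositions(ListOfLists1[1:], ListOfLists2[1:])
-- ===== Notes on version B (the rewrite author's own statement) =====
-- stated objective: alternative
-- what changed: Replaces A's indexed loops (outer range over indices, inner loop to the longer length with an index-bounds branch) by head/tail structural recursion: a recursive addRows that consumes both rows simultaneously and returns the leftover tail when one empties, and an outer recursion over the list of rows.
import Mathlib
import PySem

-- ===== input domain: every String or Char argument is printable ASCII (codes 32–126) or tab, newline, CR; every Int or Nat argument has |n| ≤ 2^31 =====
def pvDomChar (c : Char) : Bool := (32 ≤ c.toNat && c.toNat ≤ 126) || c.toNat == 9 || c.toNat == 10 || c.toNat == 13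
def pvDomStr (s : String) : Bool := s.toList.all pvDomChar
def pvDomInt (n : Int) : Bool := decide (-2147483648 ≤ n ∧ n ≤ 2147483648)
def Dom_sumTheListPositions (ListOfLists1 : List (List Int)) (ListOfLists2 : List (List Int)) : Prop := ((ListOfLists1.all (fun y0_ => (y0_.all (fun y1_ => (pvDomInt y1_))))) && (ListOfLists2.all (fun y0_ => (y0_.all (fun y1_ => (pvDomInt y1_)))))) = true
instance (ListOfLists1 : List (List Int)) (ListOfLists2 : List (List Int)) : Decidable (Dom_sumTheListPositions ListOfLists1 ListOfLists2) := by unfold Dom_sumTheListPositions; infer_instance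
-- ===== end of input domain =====

-- B replaces A's indexed loops with an inner bounds test by head/tail structural
-- recursion over both lists at once: objective 'alternative' (same cost, different shape).

-- ===== PORT A =====
def sumTheListPositions (ListOfLists1 : List (List Int)) (ListOfLists2 : List (List Int)) : List (List Int) :=
  (List.range ListOfLists1.length).foldl (fun newList (indexOfLst : Nat) =>
    let a := PySem.List.pyGetD ListOfLists1 (indexOfLst : Int) []
    let b := PySem.List.pyGetD ListOfLists2 (indexOfLst : Int) []
    newList ++ [
      if a.length > b.length then
        (List.range a.length).foldl (fun row index =>
          if index < b.length then
            row ++ [PySem.List.pyGetD a (index : Int) 0 + PySem.List.pyGetD b (index : Int) 0]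
          else
            row ++ [PySem.List.pyGetD a (index : Int) 0]) []
      else
        (List.range b.length).foldl (fun row index =>
          if index < a.length then
            row ++ [PySem.List.pyGetD a (index : Int) 0 + PySem.List.pyGetD b (index : Int) 0]
          else
            row ++ [PySem.List.pyGetD b (index : Int) 0]) []]) []

-- ===== PORT B =====
-- helper addRows of Source B: consume both rows head-first, return the leftover tail
def pvAddRows : List Int → List Int → List Int
  | [], b => b
  | a, [] => a
  | x :: xs, y :: ys => (x + y) :: pvAddRows xs ys

-- outer recursion of Source B; when ListOfLists2 runs out first the Python raises
-- IndexError at ListOfLists2[0] (excluded by Pre_), the port stops there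
def sumTheListPositions_alt : List (List Int) → List (List Int) → List (List Int)
  | [], _ => []
  | _ :: _, [] => []
  | a :: r1, b :: r2 => pvAddRows a b :: sumTheListPositions_alt r1 r2

-- ===== PRECONDITION & SPEC =====
-- Pre_ excludes exactly the inputs on which Python A raises IndexError:
-- when the second list has fewer sublists than the first, ListOfLists2[indexOfLst] is out of range.
def Pre_sumTheListPositions (ListOfLists1 : List (List Int)) (ListOfLists2 : List (List Int)) : Prop :=
  ListOfLists1.length ≤ ListOfLists2.length
instance (ListOfLists1 : List (List Int)) (ListOfLists2 : List (List Int)) : Decidable (Pre_sumTheListPositions ListOfLists1 ListOfLists2) := by unfold Pre_sumTheListPositions; infer_instance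
def pvWitness_sumTheListPositions : List (List Int) × List (List Int) := ([[1, 2, 3], [4]], [[10, 20], [30, 40], [50]])
def Spec_sumTheListPositions (ListOfLists1 : List (List Int)) (ListOfLists2 : List (List Int)) (out : List (List Int)) : Prop := out = sumTheListPositions_alt ListOfLists1 ListOfLists2
instance (ListOfLists1 : List (List Int)) (ListOfLists2 : List (List Int)) (out : List (List Int)) : Decidable (Spec_sumTheListPositions ListOfLists1 ListOfLists2 out) := by unfold Spec_sumTheListPositions; infer_instance

-- ===== CLAIM (what is proved, stated in full; the proofs are below) =====
def Claim_equal_sumTheListPositions : Prop := ∀ (ListOfLists1 : List (List Int)) (ListOfLists2 : List (List Int)), Dom_sumTheListPositions ListOfLists1 ListOfLists2 → Pre_sumTheListPositions ListOfLists1 ListOfLists2 → Spec_sumTheListPositions ListOfLists1 ListOfLists2 (sumTheListPositions ListOfLists1 ListOfLists2)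

-- ===== LEMMAS AND PROOFS =====

theorem pv_foldl_append_map {α β : Type} (l : List α) (f : α → β) (init : List β) :
    l.foldl (fun acc x => acc ++ [f x]) init = init ++ l.map f := by
  induction l generalizing init with
  | nil => simp
  | cons x xs ih => simp [List.foldl, ih]

theorem pv_if_push {α : Type} (row : List α) (c : Prop) [Decidable c] (u v : α) :
    (if c then row ++ [u] else row ++ [v]) = row ++ [if c then u else v] := by
  split_ifs <;> rfl

theorem pv_getD_range_self (l : List Int) :
    (List.range l.length).map (fun i => l.getD i 0) = l := by
  induction l with
  | nil => simp
  | cons x xs ih =>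
    rw [show (x :: xs).length = xs.length + 1 from rfl, List.range_succ_eq_map]
    simp only [List.map_cons, List.map_map]
    simpa using ih

theorem pv_row_left (a b : List Int) :
    (List.range a.length).map (fun i => if i < b.length then a.getD i 0 + b.getD i 0 else a.getD i 0)
      = (a.zip b).map (fun p => p.1 + p.2) ++ a.drop b.length := by
  induction a generalizing b with
  | nil => simp
  | cons x xs ih =>
    cases b with
    | nil =>
      simpa using pv_getD_range_self (x :: xs)
    | cons y ys =>
      rw [show (x :: xs).length = xs.length + 1 from rfl, List.range_succ_eq_map]
      simp only [List.map_cons, List.map_map, List.zip_cons_cons, List.length_cons, List.drop_succ_cons,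
        List.cons_append]
      refine List.cons_eq_cons.mpr ⟨by simp, ?_⟩
      rw [← ih ys]
      apply List.map_congr_left
      intro i _
      simp

theorem pv_row_right (a b : List Int) :
    (List.range b.length).map (fun i => if i < a.length then a.getD i 0 + b.getD i 0 else b.getD i 0)
      = (a.zip b).map (fun p => p.1 + p.2) ++ b.drop a.length := by
  induction b generalizing a with
  | nil => simp
  | cons y ys ih =>
    cases a with
    | nil =>
      simpa using pv_getD_range_self (y :: ys)
    | cons x xs =>
      rw [show (y :: ys).length = ys.length + 1 from rfl, List.range_succ_eq_map]
      simp only [List.map_cons, List.map_map, List.zip_cons_cons, List.length_cons, List.drop_succ_cons,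
        List.cons_append]
      refine List.cons_eq_cons.mpr ⟨by simp, ?_⟩
      rw [← ih xs]
      apply List.map_congr_left
      intro i _
      simp

-- addRows characterised as zip-sum plus leftover tail
theorem pv_addRows_eq (a b : List Int) :
    pvAddRows a b = (a.zip b).map (fun p => p.1 + p.2) ++
      (if a.length > b.length then a.drop b.length else b.drop a.length) := by
  induction a generalizing b with
  | nil => simp [pvAddRows]
  | cons x xs ih =>
    cases b with
    | nil => simp [pvAddRows]
    | cons y ys =>
      simp only [pvAddRows, List.zip_cons_cons, List.map_cons, List.length_cons,
        List.drop_succ_cons, List.cons_append, ih ys]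
      congr 1
      simp only [gt_iff_lt, Nat.add_lt_add_iff_right]

-- A's per-row computation equals addRows
theorem pv_row_eq (a b : List Int) :
    (if a.length > b.length then
        (List.range a.length).foldl (fun row index =>
          if index < b.length then
            row ++ [a.getD index 0 + b.getD index 0]
          else
            row ++ [a.getD index 0]) []
      else
        (List.range b.length).foldl (fun row index =>
          if index < a.length then
            row ++ [a.getD index 0 + b.getD index 0]
          else
            row ++ [b.getD index 0]) [])
    = pvAddRows a b := by
  rw [pv_addRows_eq]
  simp only [pv_if_push]
  split_ifs with h
  · rw [pv_foldl_append_map]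
    simpa using pv_row_left a b
  · rw [pv_foldl_append_map]
    simpa using pv_row_right a b

-- the outer indexed loop equals the head/tail recursion when L2 is long enough
theorem pv_outer_eq (L1 L2 : List (List Int)) (h : L1.length ≤ L2.length) :
    (List.range L1.length).map (fun i => pvAddRows (L1.getD i []) (L2.getD i []))
      = sumTheListPositions_alt L1 L2 := by
  induction L1 generalizing L2 with
  | nil => simp [sumTheListPositions_alt]
  | cons a r1 ih =>
    cases L2 with
    | nil => simp at h
    | cons b r2 =>
      rw [show (a :: r1).length = r1.length + 1 from rfl, List.range_succ_eq_map]
      simp only [List.map_cons, List.map_map, sumTheListPositions_alt]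
      refine List.cons_eq_cons.mpr ⟨by simp, ?_⟩
      rw [← ih r2 (by simpa using h)]
      apply List.map_congr_left
      intro i _
      simp

-- ===== VERDICT (by name: the statement is the Claim_ definition above) =====
theorem sumTheListPositions_spec : Claim_equal_sumTheListPositions := by
  intro L1 L2 _ hpre
  unfold Spec_sumTheListPositions sumTheListPositions
  rw [pv_foldl_append_map, ← pv_outer_eq L1 L2 hpre]
  simp only [List.nil_append]
  apply List.map_congr_left
  intro i _
  simp only [PySem.List.pyGetD_natCast]
  exact pv_row_eq _ _
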